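-- pv_equiv track=rewrite | github.com/pikuch/AOC17 | Day24.py | find_endings
-- ===== SOURCE A (Python) =====
-- def find_endings(components):
--     counts = dict()
--     for i in range(len(components)):
--         for j in range(2):
--             if components[i][j] not in counts:
--                 counts[components[i][j]] = 1
--             else:
--                 counts[components[i][j]] += 1
--     endings = set()
--     for ending, n in counts.items():
--         if n == 1:
--             endings.add(ending)
--     return endings
-- ===== SOURCE B (Python) =====
-- def find_endings(components):
--     seen = set()
--     once = set()
--     for a, b in components:
--         for v in (a, b):
--             if v in seen:
--                 once.discard(v)
--             else:
--                 seen.add(v)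
--                 once.add(v)
--     return once
-- ===== Notes on version B (the rewrite author's own statement) =====
-- stated objective: alternative
-- what changed: Replaces A's count-then-filter (a dict of occurrence counts built by nested index loops, filtered for n==1 in a second pass) with a single streaming pass that stores no counts at all: two sets 'seen' and 'once', where a value enters 'once' on first sight and is discarded from 'once' on any later sight.
import Mathlib
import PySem

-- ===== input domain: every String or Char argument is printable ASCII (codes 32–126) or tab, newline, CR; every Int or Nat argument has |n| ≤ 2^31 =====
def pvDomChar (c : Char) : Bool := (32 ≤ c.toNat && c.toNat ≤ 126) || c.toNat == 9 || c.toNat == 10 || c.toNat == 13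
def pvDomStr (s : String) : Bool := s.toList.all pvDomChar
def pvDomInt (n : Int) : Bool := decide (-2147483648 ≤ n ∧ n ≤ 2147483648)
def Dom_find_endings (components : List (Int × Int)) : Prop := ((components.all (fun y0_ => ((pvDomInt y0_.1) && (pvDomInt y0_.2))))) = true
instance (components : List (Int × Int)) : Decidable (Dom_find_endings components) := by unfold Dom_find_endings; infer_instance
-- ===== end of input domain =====

-- B replaces A's count-then-filter (dict of counts, second pass keeping n == 1) by one
-- streaming pass over two sets: 'once' gains a value at first sight and loses it at any
-- later sight; no counts are ever stored (alternative algorithm, same cost).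

-- ===== PORT A =====
def find_endings (components : List (Int × Int)) : List Int :=
  let counts : PySem.Dict Int Int :=
    (PySem.List.pyRange 0 (components.length : Int) 1).foldl (fun counts i =>
      (PySem.List.pyRange 0 2 1).foldl (fun counts j =>
        -- components[i][j]: tuple indexing, exact for j ∈ {0, 1}
        let v := if j == 0 then (PySem.List.pyGetD components i (0, 0)).1
                 else (PySem.List.pyGetD components i (0, 0)).2
        if counts.contains v = false then counts.insert v 1
        else counts.insert v (counts.getD v 0 + 1)) counts)
      PySem.Dict.empty
  counts.items.foldl (fun endings p =>
    if p.2 == 1 then PySem.Set.add endings p.1 else endings) PySem.Set.empty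

-- ===== PORT B =====
-- body of B's inner 'for v in (a, b)' loop: 'if v in seen: once.discard(v) else: seen.add(v); once.add(v)'
def pvStep (st : PySem.Set Int × PySem.Set Int) (v : Int) : PySem.Set Int × PySem.Set Int :=
  if PySem.Set.contains st.1 v then (st.1, PySem.Set.discard st.2 v)
  else (PySem.Set.add st.1 v, PySem.Set.add st.2 v)

def find_endings_alt (components : List (Int × Int)) : List Int :=
  (components.foldl (fun st c => pvStep (pvStep st c.1) c.2)
    (PySem.Set.empty, PySem.Set.empty)).2

-- ===== PRECONDITION & SPEC =====
def Spec_find_endings (components : List (Int × Int)) (out : List Int) : Prop := out = find_endings_alt components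
instance (components : List (Int × Int)) (out : List Int) : Decidable (Spec_find_endings components out) := by unfold Spec_find_endings; infer_instance

-- ===== CLAIM (what is proved, stated in full; the proofs are below) =====
def Claim_equal_find_endings : Prop := ∀ (components : List (Int × Int)), Dom_find_endings components → Spec_find_endings components (find_endings components)

-- ===== LEMMAS AND PROOFS =====

-- the values once-filtered: elements occurring exactly once, in first-occurrence order
def pvFilter2 (l : List Int) : List Int := l.filter (fun x => l.count x == 1)

-- flatten of the components
def pvFlat (components : List (Int × Int)) : List Int :=
  components.flatMap (fun c => [c.1, c.2])

-- the A-side counting step is Counter's step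
theorem pv_step_eq_modify (d : PySem.Dict Int Int) (v : Int) :
    (if d.contains v = false then d.insert v 1 else d.insert v (d.getD v 0 + 1))
      = d.modify v 0 (· + 1) := by
  by_cases h : d.contains v = false
  · simp [h, PySem.Dict.getD_of_not_contains d (k := v) (d0 := 0) h, PySem.Dict.modify]
  · simp [h, PySem.Dict.modify]

-- a fold over the flattened pair list is the pairwise double step over components
theorem pv_foldl_flatMap_pair {α : Type} (l : List (Int × Int)) (f : α → Int → α) (a : α) :
    (l.flatMap (fun c => [c.1, c.2])).foldl f a = l.foldl (fun a c => f (f a c.1) c.2) a := by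
  induction l generalizing a with
  | nil => rfl
  | cons c t ih => simp [List.flatMap_cons, ih]

-- conditionally adding the elements of a fresh nodup list to a set appends its filter
theorem pv_foldl_add_filter (p : Int → Bool) (l s : List Int) (hn : l.Nodup)
    (hd : ∀ x ∈ l, x ∉ s) :
    l.foldl (fun s k => if p k then PySem.Set.add s k else s) s = s ++ l.filter p := by
  induction l generalizing s with
  | nil => simp
  | cons a t ih =>
    rcases List.nodup_cons.mp hn with ⟨ha, hnt⟩
    by_cases hp : p a
    · have hadd : PySem.Set.add s a = s ++ [a] :=
        PySem.Set.add_of_not_mem (hd a (by simp))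
      have hd' : ∀ x ∈ t, x ∉ s ++ [a] := by
        intro x hx hxm
        rcases List.mem_append.mp hxm with hxs | hxa
        · exact hd x (by simp [hx]) hxs
        · have hxeq : x = a := by simpa using hxa
          exact ha (hxeq ▸ hx)
      simp only [List.foldl_cons]
      rw [if_pos hp, hadd, ih _ hnt hd']
      simp [hp]
    · have hd' : ∀ x ∈ t, x ∉ s := fun x hx => hd x (by simp [hx])
      simp only [List.foldl_cons]
      rw [if_neg hp, ih _ hnt hd']
      simp [hp]

-- discarding a non-member is the identity
theorem pv_discard_of_not_mem (l : List Int) (a : Int) (h : a ∉ l) :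
    PySem.Set.discard l a = l := by
  simp only [PySem.Set.discard]
  exact List.filter_eq_self.mpr (by intro b hb; simp; rintro rfl; exact h hb)

-- filtering a predicate that only holds on count-1 values commutes with dedup
theorem pv_filter_ofList (p : Int → Bool) (l : List Int)
    (hc : ∀ x, p x = true → l.count x ≤ 1) :
    (PySem.Set.ofList l).filter p = l.filter p := by
  induction l with
  | nil => rfl
  | cons a t ih =>
    rw [PySem.Set.ofList_cons]
    by_cases hp : p a
    · have hcnt := hc a hp
      rw [List.count_cons_self] at hcnt
      have hat : a ∉ t := by
        intro hm
        have := List.count_pos_iff.mpr hm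
        omega
      have : a ∉ PySem.Set.ofList t := by
        simp only [PySem.Set.mem_ofList]; exact hat
      rw [pv_discard_of_not_mem _ _ this]
      simp only [List.filter_cons, hp]
      rw [ih (by intro x hx; have := hc x hx; rw [List.count_cons] at this; omega)]
    · simp only [List.filter_cons, hp]
      have hfd : (PySem.Set.discard (PySem.Set.ofList t) a).filter p
          = (PySem.Set.ofList t).filter p := by
        simp only [PySem.Set.discard, List.filter_filter]
        apply List.filter_congr
        intro x hx
        by_cases hpx : p x
        · simp [hpx]; rintro rfl; simp [hp] at hpx
        · simp [hpx]
      rw [hfd, ih (by intro x hx; have := hc x hx; rw [List.count_cons] at this; omega)]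

-- A's nested counting loops, stage 1: the index loops are a fold over components
theorem pv_loops_eq_foldl (components : List (Int × Int)) :
    (PySem.List.pyRange 0 (components.length : Int) 1).foldl (fun counts i =>
      (PySem.List.pyRange 0 2 1).foldl (fun counts j =>
        let v := if j == 0 then (PySem.List.pyGetD components i (0, 0)).1
                 else (PySem.List.pyGetD components i (0, 0)).2
        if counts.contains v = false then counts.insert v 1
        else counts.insert v (counts.getD v 0 + 1)) counts)
      PySem.Dict.empty
    = components.foldl (fun d c =>
        (fun (d : PySem.Dict Int Int) v => if d.contains v = false then d.insert v 1
          else d.insert v (d.getD v 0 + 1))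
        ((fun (d : PySem.Dict Int Int) v => if d.contains v = false then d.insert v 1
          else d.insert v (d.getD v 0 + 1)) d c.1) c.2)
      PySem.Dict.empty := by
  have h2 : PySem.List.pyRange 0 2 1 = [(0:Int), 1] := rfl
  simp only [h2, List.foldl_cons, List.foldl_nil]
  have h := PySem.List.foldl_pyRange_pyGetD' components ((0:Int), (0:Int))
      (fun d (c : Int × Int) =>
        (fun (d : PySem.Dict Int Int) v => if d.contains v = false then d.insert v 1
          else d.insert v (d.getD v 0 + 1))
        ((fun (d : PySem.Dict Int Int) v => if d.contains v = false then d.insert v 1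
          else d.insert v (d.getD v 0 + 1)) d c.1) c.2)
      PySem.Dict.empty (a := 0) le_rfl
  simpa using h

-- stage 2: that fold is Counter(flat)
theorem pv_counts_eq_counter (components : List (Int × Int)) :
    components.foldl (fun d c =>
        (fun (d : PySem.Dict Int Int) v => if d.contains v = false then d.insert v 1
          else d.insert v (d.getD v 0 + 1))
        ((fun (d : PySem.Dict Int Int) v => if d.contains v = false then d.insert v 1
          else d.insert v (d.getD v 0 + 1)) d c.1) c.2)
      PySem.Dict.empty
    = PySem.Dict.counter (pvFlat components) := by
  rw [PySem.Dict.counter_eq_foldl, pvFlat, pv_foldl_flatMap_pair]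
  apply PySem.List.foldl_congr_mem
  intro acc c _
  simp only [pv_step_eq_modify]

-- folding Counter's items into the endings set yields the once-filtered flatten
theorem pv_items_fold (flat : List Int) :
    (PySem.Dict.counter flat).items.foldl (fun endings p =>
      if p.2 == 1 then PySem.Set.add endings p.1 else endings) PySem.Set.empty
    = pvFilter2 flat := by
  rw [PySem.Dict.items_counter, List.foldl_map]
  simp only []
  rw [pv_foldl_add_filter (fun k => ((flat.count k : Int) == 1)) _ PySem.Set.empty
      (PySem.Set.nodup_ofList flat) (by simp [PySem.Set.empty])]
  have hpred : ∀ x : Int, (((flat.count x : Int)) == 1) = (flat.count x == 1) := by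
    intro x
    by_cases h : flat.count x = 1
    · simp [h]
    · have h' : (flat.count x : Int) ≠ 1 := by exact_mod_cast h
      simp [h, h']
  rw [List.filter_congr (fun x _ => hpred x), pv_filter_ofList _ _ (by intro x hx; simp at hx; omega)]
  simp [PySem.Set.empty, pvFilter2]

-- A computes the once-filtered flatten
theorem pv_A_eq (components : List (Int × Int)) :
    find_endings components = pvFilter2 (pvFlat components) := by
  unfold find_endings
  rw [pv_loops_eq_foldl components, pv_counts_eq_counter components]
  exact pv_items_fold (pvFlat components)

-- appending one more value: ofList grows by Set.add
theorem pv_ofList_snoc (p : List Int) (a : Int) :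
    PySem.Set.ofList (p ++ [a]) = PySem.Set.add (PySem.Set.ofList p) a := by
  rw [PySem.Set.ofList_eq_foldl, PySem.Set.ofList_eq_foldl, List.foldl_append]
  rfl

-- B's step maintains the (seen = ofList p, once = pvFilter2 p) invariant
theorem pv_step_inv (p : List Int) (a : Int) :
    pvStep (PySem.Set.ofList p, pvFilter2 p) a
      = (PySem.Set.ofList (p ++ [a]), pvFilter2 (p ++ [a])) := by
  unfold pvStep
  by_cases h : a ∈ p
  · have hc : PySem.Set.contains (PySem.Set.ofList p) a = true := by
      simp [PySem.Set.mem_ofList, h]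
    rw [if_pos hc, pv_ofList_snoc]
    have hadd : PySem.Set.add (PySem.Set.ofList p) a = PySem.Set.ofList p := by
      simp only [PySem.Set.add, hc, if_true]
    rw [hadd]
    have honce : pvFilter2 (p ++ [a]) = PySem.Set.discard (pvFilter2 p) a := by
      simp only [pvFilter2, PySem.Set.discard, List.filter_append, List.filter_filter]
      have hcnt : 0 < p.count a := List.count_pos_iff.mpr h
      have h2 : ([a].filter (fun x => (p ++ [a]).count x == 1)) = [] := by
        simp [List.count_append]
        omega
      rw [h2, List.append_nil]
      apply List.filter_congr
      intro x hx
      by_cases hxa : x = a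
      · subst hxa
        simp [List.count_append]
        omega
      · rw [List.count_append]
        simp [List.count_singleton]
        rw [if_neg (fun he => hxa he.symm)]
        simp [hxa]
    rw [honce]
  · have hc : PySem.Set.contains (PySem.Set.ofList p) a = false := by
      simp [PySem.Set.mem_ofList, h]
    rw [if_neg (by rw [hc]; simp), pv_ofList_snoc]
    have honce : pvFilter2 (p ++ [a]) = PySem.Set.add (pvFilter2 p) a := by
      have hnm : a ∉ pvFilter2 p := by
        intro hm
        exact h (List.mem_of_mem_filter hm)
      rw [PySem.Set.add_of_not_mem hnm]
      simp only [pvFilter2, List.filter_append]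
      have hcnt : p.count a = 0 := List.count_eq_zero.mpr h
      have h2 : ([a].filter (fun x => (p ++ [a]).count x == 1)) = [a] := by
        simp [List.count_append, hcnt]
      rw [h2]
      congr 1
      apply List.filter_congr
      intro x hx
      have hxa : x ≠ a := by rintro rfl; exact h hx
      rw [List.count_append]
      simp [List.count_singleton]
      rw [if_neg (fun he => hxa he.symm)]
      omega
    rw [honce]

-- the full B fold over any flat list, generalized over the processed prefix
theorem pv_B_inv (l p : List Int) :
    l.foldl pvStep (PySem.Set.ofList p, pvFilter2 p)
      = (PySem.Set.ofList (p ++ l), pvFilter2 (p ++ l)) := by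
  induction l generalizing p with
  | nil => simp
  | cons a t ih =>
    rw [List.foldl_cons, pv_step_inv, ih]
    simp

-- B computes the once-filtered flatten
theorem pv_B_eq (components : List (Int × Int)) :
    find_endings_alt components = pvFilter2 (pvFlat components) := by
  unfold find_endings_alt
  rw [← pv_foldl_flatMap_pair components pvStep, ← pvFlat]
  have h0 : (PySem.Set.empty, PySem.Set.empty) = ((PySem.Set.ofList ([] : List Int)), pvFilter2 []) := rfl
  rw [h0, pv_B_inv]
  simp

-- ===== VERDICT (by name: the statement is the Claim_ definition above) =====
theorem find_endings_spec : Claim_equal_find_endings := by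
  intro components _
  unfold Spec_find_endings
  rw [pv_A_eq, pv_B_eq]
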